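-- pv_equiv track=rewrite | github.com/hirosuzuki/procon | atcoder/abc104/b.py | solve
-- ===== SOURCE A (Python) =====
-- def solve(S):
--     if S[0] != "A":
--         return False
--     s = S[1:]
--     if not "C" in s[1:-1]:
--         return False
--     i = s[1:-1].find("C") + 1
--     s = s[:i] + s[i+1:]
--     for c in s:
--         if c < "a" or c > "z":
--             return False
--     return True
-- ===== SOURCE B (Python) =====
-- def solve(S):
--     if S[0] != "A":
--         return False
--     n = len(S)
--     cpos = -1
--     for idx in range(1, n):
--         c = S[idx]
--         if c == "C" and cpos == -1 and 2 <= idx <= n - 2: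
--             cpos = idx
--         elif c < "a" or c > "z":
--             return False
--     return cpos != -1
-- ===== Notes on version B (the rewrite author's own statement) =====
-- stated objective: simpler
-- what changed: A's three phases (slice out the middle, find and delete the first capital-C marker, then re-scan for lowercase) are fused into one indexed scan that remembers the first eligible marker position and lowercase-checks every other character.
import Mathlib
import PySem

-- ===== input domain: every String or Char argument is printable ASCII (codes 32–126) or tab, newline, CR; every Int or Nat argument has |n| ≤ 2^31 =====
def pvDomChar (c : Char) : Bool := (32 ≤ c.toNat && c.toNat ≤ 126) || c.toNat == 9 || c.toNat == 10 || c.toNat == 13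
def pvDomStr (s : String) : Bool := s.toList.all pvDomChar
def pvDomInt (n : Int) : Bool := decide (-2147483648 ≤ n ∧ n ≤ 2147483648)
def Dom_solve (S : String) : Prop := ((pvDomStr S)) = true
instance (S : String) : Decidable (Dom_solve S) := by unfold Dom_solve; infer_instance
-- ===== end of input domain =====

-- B fuses A's find/delete/re-scan phases into one indexed scan; objective: simpler.

-- ===== PORT A =====
def solve (S : String) : Bool :=
  match PySem.Str.pyGet? S 0 with
  | none => false   -- IndexError on empty S; excluded by Pre_solve
  | some c0 =>
    if c0 ≠ 'A' then false
    else
      let s := PySem.List.slice S.toList (some 1) none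
      let mid := PySem.List.slice s (some 1) (some (-1))
      if ¬ (PySem.Chars.isIn ['C'] mid = true) then false
      else
        let i : Int := PySem.Chars.find mid ['C'] + 1
        let s2 := PySem.List.slice s none (some i) ++ PySem.List.slice s (some (i + 1)) none
        s2.all (fun c => !(decide (c < 'a') || decide ('z' < c)))

-- ===== PORT B =====
-- B's scan over idx = 1 .. n-1 with the running first-eligible-C position
-- (cpos = -1 while none seen), transcribed as structural recursion on the tail.
def solveAltLoop (n : Nat) (idx : Nat) (cpos : Int) : List Char → Bool
  | [] => decide (cpos ≠ -1)
  | c :: rest =>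
    if c = 'C' ∧ cpos = -1 ∧ 2 ≤ idx ∧ idx ≤ n - 2 then
      solveAltLoop n (idx + 1) (idx : Int) rest
    else if c < 'a' ∨ 'z' < c then false
    else solveAltLoop n (idx + 1) cpos rest

def solve_alt (S : String) : Bool :=
  match PySem.Str.pyGet? S 0 with
  | none => false   -- IndexError on empty S; excluded by Pre_solve
  | some c0 =>
    if c0 ≠ 'A' then false
    else solveAltLoop S.toList.length 1 (-1) S.toList.tail

-- ===== PRECONDITION & SPEC =====
-- Pre_ excludes only the empty string, on which A raises IndexError at S[0].
def Pre_solve (S : String) : Prop := S ≠ ""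
instance (S : String) : Decidable (Pre_solve S) := by unfold Pre_solve; infer_instance
def pvWitness_solve : String := "AbCde"

def Spec_solve (S : String) (out : Bool) : Prop := out = solve_alt S
instance (S : String) (out : Bool) : Decidable (Spec_solve S out) := by unfold Spec_solve; infer_instance

-- ===== CLAIM (what is proved, stated in full; the proofs are below) =====
def Claim_equal_solve : Prop := ∀ (S : String), Dom_solve S → Pre_solve S → Spec_solve S (solve S)

-- ===== LEMMAS AND PROOFS =====

-- once a C has been recorded (cpos ≠ -1), the loop is just the lowercase check
theorem loop_some (n idx : Nat) (cpos : Int) (h : cpos ≠ -1) (l : List Char) :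
    solveAltLoop n idx cpos l = l.all (fun c => !(decide (c < 'a') || decide ('z' < c))) := by
  induction l generalizing idx with
  | nil => simp [solveAltLoop, h]
  | cons c rest ih =>
    simp only [solveAltLoop, List.all_cons]
    rw [if_neg (by simp [h])]
    by_cases hc : c < 'a' ∨ 'z' < c
    · rw [if_pos hc]
      have hf : (!(decide (c < 'a') || decide ('z' < c))) = false := by
        rcases hc with hc | hc <;> simp [hc]
      simp [hf]
    · rw [if_neg hc]
      rw [not_or] at hc
      have ht : (!(decide (c < 'a') || decide ('z' < c))) = true := by
        simp [hc.1, hc.2]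
      simp [ht, ih]

-- scanning a block with no eligible C keeps cpos = -1 and demands all-lowercase
theorem loop_split (n : Nat) (l1 l2 : List Char) (idx : Nat)
    (h : ∀ k (hk : k < l1.length), ¬(l1[k] = 'C' ∧ 2 ≤ idx + k ∧ idx + k ≤ n - 2)) :
    solveAltLoop n idx (-1) (l1 ++ l2) =
      if l1.all (fun c => !(decide (c < 'a') || decide ('z' < c)))
      then solveAltLoop n (idx + l1.length) (-1) l2 else false := by
  induction l1 generalizing idx with
  | nil => simp
  | cons c rest ih =>
    simp only [List.cons_append, solveAltLoop, List.all_cons]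
    rw [if_neg (by
      intro ⟨hC, _, h2, h3⟩
      exact h 0 (by simp) ⟨by simpa using hC, by omega, by omega⟩)]
    by_cases hc : c < 'a' ∨ 'z' < c
    · rw [if_pos hc]
      have : (!(decide (c < 'a') || decide ('z' < c))) = false := by
        rcases hc with hc | hc <;> simp [hc]
      simp [this]
    · rw [if_neg hc]
      rw [not_or] at hc
      have hrest : ∀ k (hk : k < rest.length),
          ¬(rest[k] = 'C' ∧ 2 ≤ (idx + 1) + k ∧ (idx + 1) + k ≤ n - 2) := by
        intro k hk ⟨h1, h2, h3⟩
        exact h (k + 1) (by simpa using Nat.succ_lt_succ hk)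
          ⟨by simpa using h1, by omega, by omega⟩
      rw [ih (idx + 1) hrest]
      have : (!(decide (c < 'a') || decide ('z' < c))) = true := by
        simp [hc.1, hc.2]
      simp only [this, Bool.true_and, List.length_cons]
      have : idx + 1 + rest.length = idx + (rest.length + 1) := by omega
      rw [this]

theorem singleton_infix_iff {α : Type} (a : α) (l : List α) : [a] <:+: l ↔ a ∈ l := by
  constructor
  · intro h; exact List.singleton_sublist.mp h.sublist
  · intro h
    obtain ⟨s, t, rfl⟩ := List.append_of_mem h
    exact ⟨s, t, by simp⟩

theorem singleton_prefix_iff {α : Type} (a : α) (l : List α) : [a] <+: l ↔ ∃ t, l = a :: t := by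
  constructor
  · intro ⟨t, ht⟩; exact ⟨t, by simpa using ht.symm⟩
  · intro ⟨t, ht⟩; exact ⟨t, by simp [ht]⟩

theorem slice_one_neg_one (l : List Char) :
    PySem.List.slice l (some 1) (some (-1)) = l.tail.dropLast := by
  simp [PySem.List.slice, PySem.List.clampIdx, List.dropLast_eq_take]
  rcases l with _ | ⟨c, rest⟩
  · simp
  · simp

-- ===== VERDICT (by name: the statement is the Claim_ definition above) =====
theorem solve_spec : Claim_equal_solve := by
  intro S _ hpre
  unfold Spec_solve solve solve_alt
  have hne : S.toList ≠ [] := by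
    intro h
    exact hpre (by rwa [← String.toList_eq_nil_iff])
  rcases hS : S.toList with _ | ⟨c0, s⟩
  · exact absurd hS hne
  have hget : PySem.Str.pyGet? S 0 = some c0 := by
    have h0 : ((0:Nat):Int) = (0:Int) := rfl
    rw [← h0, PySem.Str.pyGet?_natCast, hS]; simp
  rw [hget]
  dsimp only
  by_cases hA : c0 = 'A'
  case neg => simp [hA]
  subst hA
  have hA' : ¬(('A':Char) ≠ 'A') := by simp
  rw [if_neg hA', if_neg hA']
  rw [PySem.List.slice_from_one]
  simp only [List.tail_cons, List.length_cons]
  set mid := PySem.List.slice s (some 1) (some (-1)) with hmiddef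
  have hmid : mid = s.tail.dropLast := slice_one_neg_one s
  have hmidlen : mid.length = s.length - 2 := by
    rw [hmid]; simp [List.length_dropLast]; omega
  have hmidget : ∀ j (hj : j < mid.length), mid[j] = s[j+1]'(by omega) := by
    intro j hj
    rw [List.getElem_of_eq hmid, List.getElem_dropLast, List.getElem_tail]
  have hn2 : s.length + 1 - 2 = s.length - 1 := by omega
  by_cases hC : PySem.Chars.isIn ['C'] mid = true
  case neg =>
    -- A returns false at the containment check; B's scan never records a C and ends false
    rw [if_pos (by simpa using hC)]
    have hnoC : 'C' ∉ mid := by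
      intro hmem
      exact hC ((PySem.Chars.isIn_iff_infix _ _).mpr ((singleton_infix_iff 'C' mid).mpr hmem))
    have hhyp : ∀ k (hk : k < s.length), ¬(s[k] = 'C' ∧ 2 ≤ 1 + k ∧ 1 + k ≤ s.length + 1 - 2) := by
      intro k hk ⟨h1, h2, h3⟩
      have hkm : k - 1 < mid.length := by omega
      have : mid[k-1] = 'C' := by
        rw [hmidget (k-1) hkm]
        have : k - 1 + 1 = k := by omega
        simp_rw [this]; exact h1
      exact hnoC (this ▸ List.getElem_mem hkm)
    have := loop_split (s.length + 1) s [] 1 hhyp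
    rw [List.append_nil] at this
    rw [this]
    split <;> simp [solveAltLoop]
  case pos =>
    rw [if_neg (by simpa using hC)]
    -- p = index of the first C in mid
    have hfindpos : 0 ≤ PySem.Chars.find mid ['C'] :=
      (PySem.Chars.find_nonneg_iff _ _).mpr ((PySem.Chars.isIn_iff_infix _ _).mp hC)
    obtain ⟨hpre1, hbefore⟩ := PySem.Chars.find_spec hfindpos
    set p : Nat := (PySem.Chars.find mid ['C']).toNat with hpdef
    obtain ⟨t, ht⟩ := (singleton_prefix_iff 'C' (mid.drop p)).mp hpre1
    have hp : p < mid.length := by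
      by_contra hc
      rw [List.drop_eq_nil_of_le (by omega)] at ht
      simp at ht
    have hmidp : mid[p] = 'C' := by
      have := List.drop_eq_getElem_cons hp
      rw [this] at ht
      exact (List.cons.injEq _ _ _ _ ▸ ht).1
    have hmidbefore : ∀ i (hi : i < p), mid[i]'(by omega) ≠ 'C' := by
      intro i hi heq
      exact hbefore i hi ((singleton_prefix_iff 'C' (mid.drop i)).mpr
        ⟨mid.drop (i+1), by rw [List.drop_eq_getElem_cons (by omega), heq]⟩)
    -- rewrite A's slices
    have hi1 : PySem.Chars.find mid ['C'] + 1 = ((p + 1 : Nat) : Int) := by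
      rw [hpdef]; push_cast [Int.toNat_of_nonneg hfindpos]; ring
    rw [hi1]
    rw [show ((p + 1 : Nat) : Int) + 1 = ((p + 2 : Nat) : Int) from by push_cast; ring]
    rw [PySem.List.slice_to_natCast, PySem.List.slice_from_natCast]
    -- B's scan: split s at the first eligible C
    have hp1 : p + 1 < s.length := by omega
    have hsC : s[p+1] = 'C' := by rw [← hmidget p hp]; exact hmidp
    have hsplit : s = s.take (p+1) ++ ('C' :: s.drop (p+2)) := by
      conv_lhs => rw [← List.take_append_drop (p+1) s]
      congr 1
      rw [List.drop_eq_getElem_cons hp1, hsC]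
    have hhyp : ∀ k (hk : k < (s.take (p+1)).length),
        ¬((s.take (p+1))[k] = 'C' ∧ 2 ≤ 1 + k ∧ 1 + k ≤ s.length + 1 - 2) := by
      intro k hk ⟨h1, h2, h3⟩
      rw [List.getElem_take] at h1
      have hklen : k < p + 1 := by simp at hk; omega
      have hk1 : 1 ≤ k := by omega
      have hkm : k - 1 < p := by omega
      apply hmidbefore (k-1) hkm
      rw [hmidget (k-1) (by omega)]
      have : k - 1 + 1 = k := by omega
      simp_rw [this]; exact h1
    have hB := loop_split (s.length + 1) (s.take (p+1)) ('C' :: s.drop (p+2)) 1 hhyp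
    rw [← hsplit] at hB
    have htklen : (s.take (p+1)).length = p + 1 := by simp; omega
    rw [htklen] at hB
    have hcond : (('C':Char) = 'C' ∧ (-1:Int) = -1 ∧ 2 ≤ 1 + (p+1) ∧ 1 + (p+1) ≤ (s.length + 1) - 2) := by
      refine ⟨rfl, rfl, by omega, by omega⟩
    rw [show solveAltLoop (s.length + 1) (1 + (p+1)) (-1) ('C' :: s.drop (p+2)) =
        solveAltLoop (s.length + 1) (1 + (p+1) + 1) ((1 + (p+1) : Nat) : Int) (s.drop (p+2)) from by
      rw [solveAltLoop, if_pos hcond]] at hB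
    rw [loop_some (s.length + 1) (1 + (p+1) + 1) ((1 + (p+1) : Nat) : Int) (by omega) (s.drop (p+2))] at hB
    rw [hB, List.all_append]
    cases hall : (s.take (p+1)).all (fun c => !(decide (c < 'a') || decide ('z' < c)))
    · rw [Bool.false_and, if_neg (by simp)]
    · rw [Bool.true_and, if_pos rfl]
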